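-- pv_equiv track=rewrite | github.com/lars-tps/Bambank-hackathon | DataRandomizer.py | randomizeID
-- ===== SOURCE A (Python) =====
-- def randomizeID(upper_bounds):
--     def lex_suc(current,bound):
--         # [0,1,1] = [1,0,0]
--         # [1,0,0] = [1,0,1]
--         i = len(current)-1
--         while current[i] == bound[i]:
--             current[i] = 0
--             i -= 1
--         current[i] += 1
--         return current
--
--     first = [0] * len(upper_bounds)
--     last = upper_bounds
--     res = [first]
--     while res[-1] != last:
--         res += [lex_suc(res[-1],upper_bounds)[:]]
--     res = joinList(res)
--     res.pop()
--     return res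
--
-- def joinList(lst):
--     ans = ""
--     lstt = []
--     for i in range (len(lst)):
--         ans = ""
--         for j in lst[i]:
--             ans += str(j)
--         lstt.append(ans)
--     return lstt
-- ===== SOURCE B (Python) =====
-- def randomizeID(upper_bounds):
--     # Iterative cartesian-product fold: extend each partial digit-string by every
--     # next digit; drop the leading all-zeros string (A never returns it).
--     strs = ['']
--     for b in upper_bounds:
--         strs = [s + str(d) for s in strs for d in range(b + 1)]
--     return strs[1:]
-- ===== Notes on version B (the rewrite author's own statement) =====
-- stated objective: faster
-- what changed: Replaces A's in-place lexicographic-successor while-loop (mutating an aliased last element, joining and popping at the end) by a single left fold that extends every partial digit-string with each next digit (iterative cartesian product), dropping the leading all-zeros string that A's aliasing omits.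
-- outside the precondition, e.g. on randomizeID([-1]): A does not finish within the time limit, B returns []
import Mathlib
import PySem

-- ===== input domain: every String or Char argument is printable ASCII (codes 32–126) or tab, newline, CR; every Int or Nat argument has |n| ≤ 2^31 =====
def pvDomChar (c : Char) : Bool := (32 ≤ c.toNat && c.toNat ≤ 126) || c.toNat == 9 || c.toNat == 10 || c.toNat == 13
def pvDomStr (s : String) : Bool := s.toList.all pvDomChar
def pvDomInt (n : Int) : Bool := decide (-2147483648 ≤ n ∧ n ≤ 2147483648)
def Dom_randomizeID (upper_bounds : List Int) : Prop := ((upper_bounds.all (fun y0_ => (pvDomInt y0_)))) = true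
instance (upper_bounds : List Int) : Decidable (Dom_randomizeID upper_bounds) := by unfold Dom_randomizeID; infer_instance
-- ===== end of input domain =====

-- B replaces A's in-place lexicographic-successor while-loop (whose aliasing drops the
-- all-zeros tuple) by an iterative cartesian-product fold over the bounds: same ordered output.

-- ===== PORT A =====
-- lex_suc scans from the right while current[i] == bound[i]; ported as a recursion on the
-- reversed lists (the fallthrough case corresponds to Python's negative-index access,
-- unreachable for the calls the loop actually makes under Pre_).
def pvLexSucRev : List Int → List Int → List Int
  | c :: cs, b :: bs => if c = b then 0 :: pvLexSucRev cs bs else (c + 1) :: cs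
  | cs, _ => cs

def pvLexSuc (current bound : List Int) : List Int :=
  (pvLexSucRev current.reverse bound.reverse).reverse

-- joinList: for each inner list build ans by appending str(j), collect into lstt
def pvStrOf (l : List Int) : String :=
  l.foldl (fun ans j => ans ++ PySem.Int.toStr j) ""

def pvJoinList (lst : List (List Int)) : List String :=
  lst.foldl (fun lstt l => lstt ++ [pvStrOf l]) []

-- the while loop: res[-1] is mutated in place to its successor (the mutated object stays
-- at position -2) and a copy is appended, i.e. res := res.dropLast ++ [nxt, nxt];
-- fuel (the number of tuples) only bounds the recursion, the Python guard
-- res[-1] != last is kept as is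
def pvLoopA (bound : List Int) : Nat → List (List Int) → List (List Int)
  | 0, res => res
  | f + 1, res =>
    if res.getLastD [] = bound then res
    else
      let nxt := pvLexSuc (res.getLastD []) bound
      pvLoopA bound f (res.dropLast ++ [nxt, nxt])

def randomizeID (upper_bounds : List Int) : List String :=
  let first : List Int := List.replicate upper_bounds.length 0
  let fuel : Nat := upper_bounds.foldl (fun a b => a * (b + 1).toNat) 1
  let res := pvLoopA upper_bounds fuel [first]
  (pvJoinList res).dropLast

-- ===== PORT B =====
def randomizeID_alt (upper_bounds : List Int) : List String :=
  (upper_bounds.foldl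
    (fun strs b =>
      strs.flatMap (fun s => (PySem.List.pyRange 0 (b + 1) 1).map (fun d => s ++ PySem.Int.toStr d)))
    [""]).drop 1

-- ===== PRECONDITION & SPEC =====
-- Pre_ excludes lists containing a negative bound: on those Python A's while-loop never
-- terminates (the successor never reaches `last`), so Pre_ is exactly where A returns.
def Pre_randomizeID (upper_bounds : List Int) : Prop := ∀ x ∈ upper_bounds, 0 ≤ x
instance (upper_bounds : List Int) : Decidable (Pre_randomizeID upper_bounds) := by
  unfold Pre_randomizeID; infer_instance

def pvWitness_randomizeID : List Int := [1, 2]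

def Spec_randomizeID (upper_bounds : List Int) (out : List String) : Prop := out = randomizeID_alt upper_bounds
instance (upper_bounds : List Int) (out : List String) : Decidable (Spec_randomizeID upper_bounds out) := by unfold Spec_randomizeID; infer_instance

-- ===== CLAIM (what is proved, stated in full; the proofs are below) =====
def Claim_equal_randomizeID : Prop := ∀ (upper_bounds : List Int), Dom_randomizeID upper_bounds → Pre_randomizeID upper_bounds → Spec_randomizeID upper_bounds (randomizeID upper_bounds)

-- ===== LEMMAS AND PROOFS =====

-- the canonical lexicographic enumeration both programs walk through
def pvE : List Int → List (List Int)
  | [] => [[]]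
  | b :: bs => (PySem.List.pyRange 0 (b + 1) 1).flatMap (fun d => (pvE bs).map (d :: ·))

-- the chain relation holding between consecutive elements of pvE bs
def pvR (bs : List Int) (x y : List Int) : Prop :=
  x.length = bs.length ∧ x ≠ bs ∧ pvLexSuc x bs = y

theorem pvLexSucRev_ne {cs ds : List Int} (es fs : List Int)
    (hne : cs ≠ ds) (hlen : cs.length = ds.length) :
    pvLexSucRev (cs ++ es) (ds ++ fs) = pvLexSucRev cs ds ++ es := by
  induction cs generalizing ds with
  | nil => cases ds with
    | nil => exact absurd rfl hne
    | cons d ds => simp at hlen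
  | cons c cs ih =>
    cases ds with
    | nil => simp at hlen
    | cons d ds =>
      by_cases hcd : c = d
      · subst hcd
        have : cs ≠ ds := by intro h; exact hne (by rw [h])
        simp [pvLexSucRev, ih this (by simpa using hlen)]
      · simp [pvLexSucRev, hcd]

theorem pvLexSucRev_eq (ds es fs : List Int) :
    pvLexSucRev (ds ++ es) (ds ++ fs) = ds.map (fun _ => 0) ++ pvLexSucRev es fs := by
  induction ds with
  | nil => simp
  | cons d ds ih => simp [pvLexSucRev, ih]

theorem pvStrOf_foldl (t : List Int) (a : String) :
    t.foldl (fun ans j => ans ++ PySem.Int.toStr j) a = a ++ pvStrOf t := by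
  induction t generalizing a with
  | nil => simp [pvStrOf]
  | cons j t ih =>
    show List.foldl _ (a ++ PySem.Int.toStr j) t = _
    rw [ih]
    conv_rhs => rw [pvStrOf, List.foldl_cons, ih ("" ++ PySem.Int.toStr j)]
    simp [String.append_assoc, pvStrOf]

theorem pvStrOf_cons (d : Int) (t : List Int) :
    pvStrOf (d :: t) = PySem.Int.toStr d ++ pvStrOf t := by
  rw [pvStrOf, List.foldl_cons, pvStrOf_foldl]
  simp

theorem pvJoinList_eq (lst : List (List Int)) : pvJoinList lst = lst.map pvStrOf := by
  suffices h : ∀ acc, lst.foldl (fun lstt l => lstt ++ [pvStrOf l]) acc = acc ++ lst.map pvStrOf by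
    simpa [pvJoinList] using h []
  induction lst with
  | nil => simp
  | cons l lst ih => intro acc; simp [ih]

theorem pvE_head {bs : List Int} (h : ∀ x ∈ bs, 0 ≤ x) :
    pvE bs = List.replicate bs.length 0 :: (pvE bs).tail := by
  induction bs with
  | nil => simp [pvE]
  | cons b bs ih =>
    have hb : (0:Int) < b + 1 := by have := h b (by simp); omega
    have hh : ∀ x ∈ bs, (0:Int) ≤ x := fun x hx => h x (by simp [hx])
    rw [pvE, PySem.List.pyRange_one_cons hb, List.flatMap_cons]
    obtain ⟨t, ht⟩ : ∃ t, pvE bs = List.replicate bs.length 0 :: t := ⟨_, ih hh⟩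
    rw [ht]
    simp [List.replicate_succ]

theorem pvE_last {bs : List Int} (h : ∀ x ∈ bs, 0 ≤ x) :
    ∃ p, pvE bs = p ++ [bs] := by
  induction bs with
  | nil => exact ⟨[], rfl⟩
  | cons b bs ih =>
    have hb : (0:Int) ≤ b := h b (by simp)
    obtain ⟨p, hp⟩ := ih (fun x hx => h x (by simp [hx]))
    refine ⟨(PySem.List.pyRange 0 b 1).flatMap (fun d => (pvE bs).map (d :: ·)) ++ p.map (b :: ·), ?_⟩
    rw [pvE, PySem.List.pyRange_one_succ_right hb, List.flatMap_append, List.flatMap_cons, hp]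
    simp

theorem pvE_length (bs : List Int) :
    (pvE bs).length = bs.foldl (fun a b => a * (b + 1).toNat) 1 := by
  have key : ∀ (bs : List Int) (a : Nat), bs.foldl (fun a b => a * (b + 1).toNat) a
      = a * bs.foldl (fun a b => a * (b + 1).toNat) 1 := by
    intro bs
    induction bs with
    | nil => simp
    | cons b bs ih => intro a; rw [List.foldl_cons, ih, List.foldl_cons, ih ((1:Nat) * _)]; ring
  induction bs with
  | nil => simp [pvE]
  | cons b bs ih =>
    rw [pvE, List.length_flatMap, List.foldl_cons, key, one_mul]
    simp [ih, PySem.List.length_pyRange_one]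

theorem pvSuc_cons {x bs : List Int} (d b : Int) (hlen : x.length = bs.length)
    (hne : x ≠ bs) : pvLexSuc (d :: x) (b :: bs) = d :: pvLexSuc x bs := by
  unfold pvLexSuc
  rw [List.reverse_cons, List.reverse_cons,
    pvLexSucRev_ne [d] [b] (fun h => hne (by simpa using congrArg List.reverse h)) (by simpa using hlen)]
  simp

theorem pvSuc_carry {bs : List Int} (d b : Int) (hne : d ≠ b) :
    pvLexSuc (d :: bs) (b :: bs) = (d + 1) :: List.replicate bs.length 0 := by
  unfold pvLexSuc
  rw [List.reverse_cons, List.reverse_cons, pvLexSucRev_eq]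
  have : pvLexSucRev [d] [b] = [d + 1] := by simp [pvLexSucRev, hne]
  rw [this]
  simp [List.map_const']

theorem pvE_chain {bs : List Int} (h : ∀ x ∈ bs, 0 ≤ x) :
    List.IsChain (pvR bs) (pvE bs) := by
  induction bs with
  | nil => simp [pvE]
  | cons b bs ih =>
    have hb : (0:Int) ≤ b := h b (by simp)
    have hh : ∀ x ∈ bs, (0:Int) ≤ x := fun x hx => h x (by simp [hx])
    have chainTail := ih hh
    obtain ⟨p, hp⟩ := pvE_last hh
    have blockChain : ∀ d : Int, List.IsChain (pvR (b :: bs)) ((pvE bs).map (d :: ·)) := by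
      intro d
      rw [List.isChain_map]
      refine chainTail.imp ?_
      rintro x y ⟨hl, hne, hs⟩
      exact ⟨by simpa using hl, by simp [hne], by rw [pvSuc_cons d b hl hne, hs]⟩
    have blockLast : ∀ d : Int, ((pvE bs).map (d :: ·)).getLast? = some (d :: bs) := by
      intro d; rw [hp]; simp
    have blockHead : ∀ d : Int, ((pvE bs).map (d :: ·)).head? = some (d :: List.replicate bs.length 0) := by
      intro d; conv_lhs => rw [pvE_head hh]
      simp
    have boundary : ∀ d : Int, d ≠ b → pvR (b :: bs) (d :: bs) ((d + 1) :: List.replicate bs.length 0) :=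
      fun d hd => ⟨by simp, by simp [hd], pvSuc_carry d b hd⟩
    have aux : ∀ n : Nat, (n : Int) ≤ b →
        List.IsChain (pvR (b :: bs)) ((PySem.List.pyRange 0 ((n:Int) + 1) 1).flatMap (fun d => (pvE bs).map (d :: ·)))
        ∧ ((PySem.List.pyRange 0 ((n:Int) + 1) 1).flatMap (fun d => (pvE bs).map (d :: ·))).getLast? = some ((n:Int) :: bs) := by
      intro n
      induction n with
      | zero =>
        intro _
        have h1 : PySem.List.pyRange 0 ((0:Int) + 1) 1 = [0] := by
          rw [PySem.List.pyRange_one_cons (by norm_num)]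
          simp
        simp only [Nat.cast_zero]
        rw [h1, List.flatMap_cons, List.flatMap_nil, List.append_nil]
        exact ⟨blockChain 0, blockLast 0⟩
      | succ n ihn =>
        intro hnb
        have hn : (n : Int) ≤ b := by push_cast at hnb ⊢; omega
        obtain ⟨c1, l1⟩ := ihn hn
        have hr : PySem.List.pyRange 0 (((n:Nat)+1:Nat) + 1) 1
            = PySem.List.pyRange 0 ((n:Int) + 1) 1 ++ [(n:Int) + 1] := by
          push_cast
          exact PySem.List.pyRange_one_succ_right (by positivity)
        rw [hr, List.flatMap_append, List.flatMap_cons, List.flatMap_nil, List.append_nil]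
        constructor
        · rw [List.isChain_append]
          refine ⟨c1, blockChain _, ?_⟩
          intro x hx y hy
          rw [l1] at hx
          rw [blockHead] at hy
          simp at hx hy
          subst hx; subst hy
          exact boundary n (by push_cast at hnb; omega)
        · rw [List.getLast?_append, blockLast]
          simp
    have hb1 : b + 1 = ((b.toNat : Int) + 1) := by rw [Int.toNat_of_nonneg hb]
    rw [pvE, hb1]
    exact (aux b.toNat (by rw [Int.toNat_of_nonneg hb])).1

theorem pvLoopA_run (bs : List Int) :
    ∀ (rest : List (List Int)) (acc : List (List Int)) (cur : List Int) (fuel : Nat),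
      List.IsChain (pvR bs) (cur :: rest) → (cur :: rest).getLast (by simp) = bs →
      rest.length ≤ fuel →
      pvLoopA bs fuel (acc ++ [cur]) = acc ++ rest ++ [bs] := by
  intro rest
  induction rest with
  | nil =>
    intro acc cur fuel _ hlast _
    simp at hlast
    subst hlast
    cases fuel with
    | zero => simp [pvLoopA]
    | succ f => rw [pvLoopA, List.getLastD_concat, if_pos rfl]; simp
  | cons y r ihr =>
    intro acc cur fuel hchain hlast hfuel
    cases fuel with
    | zero => simp at hfuel
    | succ f =>
      rw [List.isChain_cons] at hchain
      obtain ⟨hne, hsuc⟩ := (hchain.1 y (by simp) : pvR bs cur y).2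
      rw [pvLoopA, List.getLastD_concat, if_neg hne, List.dropLast_concat]
      have step : acc ++ [pvLexSuc cur bs, pvLexSuc cur bs] = (acc ++ [y]) ++ [y] := by
        rw [hsuc]; simp
      show pvLoopA bs f (acc ++ [pvLexSuc cur bs, pvLexSuc cur bs]) = _
      rw [step, ihr (acc ++ [y]) y f hchain.2 (by simpa using hlast) (by simpa using hfuel)]
      simp

theorem pvAlt_fold (bs : List Int) (strs : List String) :
    bs.foldl
      (fun strs b =>
        strs.flatMap (fun s => (PySem.List.pyRange 0 (b + 1) 1).map (fun d => s ++ PySem.Int.toStr d)))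
      strs
    = strs.flatMap (fun s => (pvE bs).map (fun t => s ++ pvStrOf t)) := by
  induction bs generalizing strs with
  | nil => simp [pvE, pvStrOf]
  | cons b bs ih =>
    rw [List.foldl_cons, ih]
    rw [pvE]
    simp only [List.flatMap_assoc, List.flatMap_map, List.map_flatMap, List.map_map]
    simp [pvStrOf_cons, String.append_assoc, Function.comp_def]

theorem randomizeID_alt_eq (bs : List Int) :
    randomizeID_alt bs = ((pvE bs).map pvStrOf).drop 1 := by
  rw [randomizeID_alt, pvAlt_fold]
  simp

theorem randomizeID_eq {bs : List Int} (h : ∀ x ∈ bs, 0 ≤ x) :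
    randomizeID bs = ((pvE bs).map pvStrOf).drop 1 := by
  have hhead := pvE_head h
  obtain ⟨p, hp⟩ := pvE_last h
  have hchain := pvE_chain h
  have hlast : (List.replicate bs.length (0:Int) :: (pvE bs).tail).getLast (by simp) = bs := by
    have h1 : (pvE bs).getLast? = some bs := by rw [hp]; exact List.getLast?_concat
    rw [hhead] at h1
    rwa [List.getLast?_eq_some_getLast (by simp), Option.some_inj] at h1
  have hfuel : (pvE bs).tail.length ≤ bs.foldl (fun a b => a * (b + 1).toNat) 1 := by
    rw [← pvE_length]
    simp [List.length_tail]
  rw [randomizeID]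
  show (pvJoinList (pvLoopA bs _ [List.replicate bs.length 0])).dropLast = _
  have hrun := pvLoopA_run bs (pvE bs).tail [] (List.replicate bs.length 0)
    (bs.foldl (fun a b => a * (b + 1).toNat) 1) (hhead ▸ hchain) hlast hfuel
  rw [List.nil_append] at hrun
  rw [hrun, pvJoinList_eq, List.nil_append, List.map_append,
    show List.map pvStrOf [bs] = [pvStrOf bs] from rfl, List.dropLast_concat]
  conv_rhs => rw [hhead]
  simp

-- ===== VERDICT (by name: the statement is the Claim_ definition above) =====
theorem randomizeID_spec : Claim_equal_randomizeID := by
  intro ub _ hpre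
  unfold Spec_randomizeID
  rw [randomizeID_eq hpre, randomizeID_alt_eq]
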